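-- pv_equiv track=rewrite | github.com/schism-dev/schism | src/Utility/Grid_Scripts/Compound_flooding/RiverMapper/RiverMapper/river_map_tif_preproc.py | parse_dem_tiles
-- ===== SOURCE A (Python) =====
-- import math
--
-- def parse_dem_tiles(dem_code, dem_tile_digits):
--     '''
--     Parse a dem_code into the original DEM id.
--     A unique code is assigned to all parent tiles (from the same DEM source) of a thalweg, e.g.:
--     327328329 is actually Tile No. 327, 328, 329
--     Almost all thalwegs only have <=4 parent tiles (when it is near the intersection point);
--     n_tiles > 4 will generate an exception.
--     '''
--     if dem_code == 0:
--         return [-1]  # no DEM found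
--
--     dem_tile_ids = []
--     n_tiles = int(math.log10(dem_code)/dem_tile_digits) + 1
--     if n_tiles > 4:
--         raise ValueError("Some thalweg points belong to more than 4 tiles from one DEM source, you may need to clean up the DEM tiles first.")
--     for digit in reversed(range(n_tiles)):
--         x, dem_code = divmod(dem_code, 10**(digit*dem_tile_digits))
--         dem_tile_ids.append(int(x-1))
--     return dem_tile_ids
-- ===== SOURCE B (Python) =====
-- def _split_last_group(x, n_digits):
--     '''Split off the last n_digits decimal digits of x: returns (rest, group).'''
--     group = 0
--     place = 1
--     for _ in range(n_digits):
--         if x == 0: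
--             break
--         x, digit = divmod(x, 10)
--         group += digit * place
--         place *= 10
--     return x, group
--
-- def parse_dem_tiles(dem_code, dem_tile_digits):
--     '''
--     Parse a dem_code into the original DEM id.
--     Decodes LSB-first, peeling one tile group (dem_tile_digits decimal digits)
--     at a time with single-digit divmods, then reverses; raises ValueError if
--     more than 4 tiles are encoded.
--     '''
--     if dem_code == 0:
--         return [-1]  # no DEM found
--
--     dem_tile_ids = []
--     while dem_code:
--         dem_code, group = _split_last_group(dem_code, dem_tile_digits)
--         dem_tile_ids.append(group - 1)
--     if len(dem_tile_ids) > 4: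
--         raise ValueError("Some thalweg points belong to more than 4 tiles from one DEM source, you may need to clean up the DEM tiles first.")
--     dem_tile_ids.reverse()
--     return dem_tile_ids
-- ===== Notes on version B (the rewrite author's own statement) =====
-- stated objective: alternative
-- what changed: A pre-computes the group count from math.log10 and peels groups MSB-first with a varying power-of-ten divisor; B needs no size computation and no big powers at all: it peels groups LSB-first, one decimal digit at a time via divmod(x, 10), reverses at the end, and the >4-tiles ValueError becomes a length check.
-- outside the precondition, e.g. on parse_dem_tiles(5, -1): A returns [4], B does not finish within the time limit; on parse_dem_tiles(100, -1): A returns [], B does not finish within the time limit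
import Mathlib
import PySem

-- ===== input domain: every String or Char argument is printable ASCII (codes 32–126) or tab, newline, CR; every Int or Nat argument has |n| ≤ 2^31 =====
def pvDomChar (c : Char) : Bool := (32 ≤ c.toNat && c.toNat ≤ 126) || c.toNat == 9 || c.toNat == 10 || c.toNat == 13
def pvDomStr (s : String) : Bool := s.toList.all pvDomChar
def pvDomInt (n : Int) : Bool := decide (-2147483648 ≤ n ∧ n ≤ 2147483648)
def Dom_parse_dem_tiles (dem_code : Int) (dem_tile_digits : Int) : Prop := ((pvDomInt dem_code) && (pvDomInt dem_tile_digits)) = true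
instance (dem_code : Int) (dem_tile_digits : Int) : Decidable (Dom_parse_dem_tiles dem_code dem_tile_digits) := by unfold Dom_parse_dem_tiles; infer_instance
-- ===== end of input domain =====

-- B decodes the tile groups LSB-first, peeling one group at a time with single-digit divmods and
-- reversing, instead of A's log10 size computation and MSB-first peeling with varying powers
-- of ten (objective: alternative).


-- ===== PORT A =====
def parse_dem_tiles (dem_code : Int) (dem_tile_digits : Int) : List Int :=
  if dem_code = 0 then [-1]
  else
    -- int(math.log10(dem_code)/dem_tile_digits) ported by hand as floor(log10 dem_code) // dem_tile_digits:
    -- exact on Pre_ (0 < dem_code ≤ 2^31, 1 ≤ dem_tile_digits), where float log10 is exact enough and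
    -- int() truncation of the nonnegative quotient coincides with floor division.
    let n_tiles : Int := PySem.Int.floordiv ((Nat.log 10 dem_code.toNat : Nat) : Int) dem_tile_digits + 1
    if n_tiles > 4 then []  -- raise ValueError (outside Pre_)
    else
      let st := ((PySem.List.pyRange 0 n_tiles 1).reverse).foldl
        (fun (st : Int × List Int) digit =>
          let m : Int := 10 ^ (digit * dem_tile_digits).toNat  -- 10**(digit*dem_tile_digits); exponent ≥ 0 on Pre_
          (PySem.Int.mod st.1 m, st.2 ++ [PySem.Int.floordiv st.1 m - 1]))
        (dem_code, [])
      st.2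

-- ===== PORT B =====
-- Source B's _split_last_group: 'for _ in range(n_digits)' over state (x, group, place) with the
-- x == 0 break; range(n_digits) has n_digits.toNat iterations (empty for n_digits ≤ 0, as in Python)
def pvSplitLoop : Nat → Int → Int → Int → Int × Int
  | 0, x, group, _ => (x, group)
  | k+1, x, group, place =>
    if x = 0 then (x, group)
    else pvSplitLoop k (PySem.Int.floordiv x 10) (group + PySem.Int.mod x 10 * place) (place * 10)

-- the 'while dem_code:' loop of Source B; fuel only makes it total (inside Pre_ each step strips at
-- least one decimal digit, so dem_code.toNat + 1 steps always suffice)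
def pvAltLoop (n_digits : Nat) : Nat → Int → List Int → List Int
  | 0, _, acc => acc
  | fuel+1, x, acc =>
    if x = 0 then acc
    else
      let st := pvSplitLoop n_digits x 0 1
      pvAltLoop n_digits fuel st.1 (acc ++ [st.2 - 1])

def parse_dem_tiles_alt (dem_code : Int) (dem_tile_digits : Int) : List Int :=
  if dem_code = 0 then [-1]
  else
    let ids := pvAltLoop dem_tile_digits.toNat (dem_code.toNat + 1) dem_code []
    if ids.length > 4 then []  -- raise ValueError (outside Pre_)
    else ids.reverse

-- ===== PRECONDITION & SPEC =====
-- Pre_ excludes: negative dem_code (math.log10 raises a math domain error) and dem_tile_digits = 0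
-- (ZeroDivisionError); dem_code ≥ 10^(4*dem_tile_digits), i.e. more than 4 encoded tiles, where both
-- programs raise ValueError; and negative dem_tile_digits, a tile width outside the natural domain,
-- where A's truncated-log10 value is accidental and B's float divmod loop does not terminate.
def Pre_parse_dem_tiles (dem_code : Int) (dem_tile_digits : Int) : Prop :=
  dem_code = 0 ∨
    (0 < dem_code ∧ 1 ≤ dem_tile_digits ∧
      ((Nat.log 10 dem_code.toNat : Nat) : Int) < 4 * dem_tile_digits)
instance (dem_code : Int) (dem_tile_digits : Int) : Decidable (Pre_parse_dem_tiles dem_code dem_tile_digits) := by unfold Pre_parse_dem_tiles; infer_instance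
def pvWitness_parse_dem_tiles : Int × Int := (327328329, 3)

def Spec_parse_dem_tiles (dem_code : Int) (dem_tile_digits : Int) (out : List Int) : Prop := out = parse_dem_tiles_alt dem_code dem_tile_digits
instance (dem_code : Int) (dem_tile_digits : Int) (out : List Int) : Decidable (Spec_parse_dem_tiles dem_code dem_tile_digits out) := by unfold Spec_parse_dem_tiles; infer_instance

-- ===== CLAIM (what is proved, stated in full; the proofs are below) =====
def Claim_equal_parse_dem_tiles : Prop := ∀ (dem_code : Int) (dem_tile_digits : Int), Dom_parse_dem_tiles dem_code dem_tile_digits → Pre_parse_dem_tiles dem_code dem_tile_digits → Spec_parse_dem_tiles dem_code dem_tile_digits (parse_dem_tiles dem_code dem_tile_digits)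

-- ===== LEMMAS AND PROOFS =====

-- number of base-B groups of X (0 for X = 0)
def pvND (B X : Nat) : Nat := if X = 0 then 0 else Nat.log B X + 1

lemma pvND_pos (B X : Nat) (hX : X ≠ 0) : pvND B X = Nat.log B X + 1 := by
  simp [pvND, hX]

lemma pvND_step (B X : Nat) (hB : 2 ≤ B) (hX : X ≠ 0) :
    pvND B X = pvND B (X / B) + 1 := by
  rcases lt_or_ge X B with h | h
  · have : X / B = 0 := Nat.div_eq_of_lt h
    simp [pvND, hX, this, Nat.log_eq_zero_iff, h]
  · have h1 : X / B ≠ 0 := by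
      have := Nat.one_le_div_iff (by omega : 0 < B) |>.mpr h
      omega
    have h2 : Nat.log B (X / B) = Nat.log B X - 1 := by
      rw [← Nat.log_div_base]
    have h3 : 1 ≤ Nat.log B X := by
      have := Nat.log_pos (by omega : 1 < B) h
      omega
    simp [pvND, hX, h1, h2]
    omega

-- the inner digit loop of Source B, fully unrolled: it divides off the last 10^k-block
lemma pvSplitLoop_spec :
    ∀ (k : Nat) (X : Nat) (group : Int) (place : Nat),
      pvSplitLoop k (X : Int) group (place : Int)
        = (((X / 10 ^ k : Nat) : Int), group + ((X % 10 ^ k : Nat) : Int) * (place : Int)) := by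
  intro k
  induction k with
  | zero => intro X group place; simp [pvSplitLoop]
  | succ k ih =>
    intro X group place
    by_cases hX : X = 0
    · subst hX; simp [pvSplitLoop]
    · have hX0 : (X : Int) ≠ 0 := by exact_mod_cast hX
      rw [pvSplitLoop, if_neg hX0,
        show PySem.Int.floordiv (X : Int) 10 = ((X / 10 : Nat) : Int) by
          exact_mod_cast PySem.Int.floordiv_natCast X 10,
        show PySem.Int.mod (X : Int) 10 = ((X % 10 : Nat) : Int) by
          exact_mod_cast PySem.Int.mod_natCast X 10,
        show ((place : Nat) : Int) * 10 = ((place * 10 : Nat) : Int) by push_cast; ring,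
        ih (X / 10) _ (place * 10)]
      have hfst : X / 10 / 10 ^ k = X / 10 ^ (k + 1) := by
        rw [Nat.div_div_eq_div_mul, ← pow_succ']
      have hsnd : X % 10 ^ (k + 1) = X % 10 + 10 * (X / 10 % 10 ^ k) := by
        rw [pow_succ', Nat.mod_mul]
      rw [hfst, hsnd]
      push_cast
      ring_nf

-- B's outer loop, fully unrolled: LSB-first list of (group - 1)
lemma pvAltLoop_spec (d B : Nat) (hB2 : 2 ≤ B) (hB : B = 10 ^ d) :
    ∀ (fuel X : Nat) (acc : List Int), X < fuel →
      pvAltLoop d fuel (X : Int) acc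
        = acc ++ (List.range (pvND B X)).map (fun k => ((X / B ^ k % B : Nat) : Int) - 1) := by
  intro fuel
  induction fuel with
  | zero => intro X acc h; omega
  | succ n ih =>
    intro X acc h
    by_cases hX : X = 0
    · subst hX; simp [pvAltLoop, pvND]
    · have hX0 : (X : Int) ≠ 0 := by exact_mod_cast hX
      rw [pvAltLoop, if_neg hX0]
      have hsplit : pvSplitLoop d (X : Int) 0 1
          = (((X / B : Nat) : Int), ((X % B : Nat) : Int)) := by
        rw [show (1 : Int) = ((1 : Nat) : Int) by norm_num, pvSplitLoop_spec d X _ 1, hB]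
        norm_num
      simp only [hsplit]
      have hrec : X / B < n := by
        have h1 : X / B < X := Nat.div_lt_self (by omega) (by omega)
        omega
      rw [ih (X / B) _ hrec]
      have hf0 : ((X / B ^ 0 % B : Nat) : Int) - 1 = ((X % B : Nat) : Int) - 1 := by norm_num
      have hmap : List.map ((fun k => ((X / B ^ k % B : Nat) : Int) - 1) ∘ Nat.succ)
            (List.range (pvND B (X / B)))
          = List.map (fun k => ((X / B / B ^ k % B : Nat) : Int) - 1)
            (List.range (pvND B (X / B))) := by
        apply List.map_congr_left
        intro k _
        simp only [Function.comp, Nat.succ_eq_add_one]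
        rw [Nat.div_div_eq_div_mul, ← pow_succ']
      rw [pvND_step B X hB2 hX, List.range_succ_eq_map, List.map_cons, List.map_map, hf0, hmap]
      simp

-- A's loop, fully unrolled: MSB-first list of (group - 1), given X < B^n
lemma pvAFold_spec (d B : Nat) (hB : B = 10 ^ d) :
    ∀ (n : Nat) (X : Nat) (acc : List Int), X < B ^ n →
      (((PySem.List.pyRange 0 (n : Int) 1).reverse).foldl
        (fun (st : Int × List Int) digit =>
          let m : Int := 10 ^ (digit * ((d : Nat) : Int)).toNat
          (PySem.Int.mod st.1 m, st.2 ++ [PySem.Int.floordiv st.1 m - 1]))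
        ((X : Int), acc)).2
      = acc ++ ((List.range n).map (fun k => ((X / B ^ k % B : Nat) : Int) - 1)).reverse := by
  intro n
  induction n with
  | zero =>
    intro X acc _
    rw [show ((0 : Nat) : Int) = 0 from rfl, PySem.List.pyRange_one_eq_nil (by omega)]
    simp
  | succ n ih =>
    intro X acc hX
    have hsplit : PySem.List.pyRange 0 ((n + 1 : Nat) : Int) 1
        = PySem.List.pyRange 0 (n : Int) 1 ++ [(n : Int)] := by
      push_cast
      exact PySem.List.pyRange_one_succ_right (by exact_mod_cast Nat.zero_le n)
    rw [hsplit, List.reverse_append]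
    simp only [List.reverse_singleton, List.singleton_append, List.foldl_cons]
    -- the first step: digit = n, modulus B^n
    have hm : ((n : Int) * ((d : Nat) : Int)).toNat = n * d := by
      rw [← Nat.cast_mul, Int.toNat_natCast]
    have hmeq : (10 : Int) ^ ((n : Int) * ((d : Nat) : Int)).toNat = ((B ^ n : Nat) : Int) := by
      rw [hm, hB, ← pow_mul]
      push_cast
      ring
    simp only [hmeq]
    rw [PySem.Int.mod_natCast X (B ^ n), PySem.Int.floordiv_natCast X (B ^ n)]
    rw [ih (X % B ^ n) _ (Nat.mod_lt _ (by rw [hB]; positivity))]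
    have hlt : X / B ^ n < B := by
      rw [Nat.div_lt_iff_lt_mul (by rw [hB]; positivity), ← pow_succ']
      exact hX
    have hfn : ((X / B ^ n % B : Nat) : Int) - 1 = ((X / B ^ n : Nat) : Int) - 1 := by
      rw [Nat.mod_eq_of_lt hlt]
    have hmap : List.map (fun k => ((X % B ^ n / B ^ k % B : Nat) : Int) - 1) (List.range n)
        = List.map (fun k => ((X / B ^ k % B : Nat) : Int) - 1) (List.range n) := by
      apply List.map_congr_left
      intro k hk
      rw [List.mem_range] at hk
      -- (X % B^n) / B^k % B = X / B^k % B for k < n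
      have hdvd : B ^ k * B ∣ B ^ n := by
        rw [← pow_succ]; exact pow_dvd_pow B (by omega)
      rw [← Nat.mod_mul_right_div_self, ← Nat.mod_mul_right_div_self,
        Nat.mod_mod_of_dvd _ hdvd]
    rw [List.range_succ, List.map_append, List.reverse_append, hmap]
    simp only [List.map_cons, List.map_nil, List.reverse_singleton, List.singleton_append]
    rw [hfn]
    simp

-- log base 10^d in terms of log base 10
lemma pvLog_pow (d X : Nat) (hd : 1 ≤ d) (hX : X ≠ 0) :
    Nat.log (10 ^ d) X = Nat.log 10 X / d := by
  set L := Nat.log 10 X with hL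
  apply Nat.log_eq_of_pow_le_of_lt_pow
  · rw [← pow_mul]
    calc (10 : Nat) ^ (d * (L / d)) ≤ 10 ^ L :=
          Nat.pow_le_pow_right (by omega) (Nat.mul_div_le L d)
      _ ≤ X := Nat.pow_log_le_self 10 hX
  · rw [← pow_mul]
    calc X < 10 ^ (L + 1) := Nat.lt_pow_succ_log_self (by omega) X
      _ ≤ 10 ^ (d * (L / d + 1)) := by
          apply Nat.pow_le_pow_right (by omega)
          have h1 : L % d < d := Nat.mod_lt _ (by omega)
          have h2 := Nat.div_add_mod L d
          have h3 : d * (L / d + 1) = d * (L / d) + d := by rw [Nat.mul_add, Nat.mul_one]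
          omega

lemma pvND_eq (d X : Nat) (hd : 1 ≤ d) (hX : X ≠ 0) :
    pvND (10 ^ d) X = Nat.log 10 X / d + 1 := by
  rw [pvND_pos _ _ hX, pvLog_pow d X hd hX]

-- ===== VERDICT (by name: the statement is the Claim_ definition above) =====
theorem parse_dem_tiles_spec : Claim_equal_parse_dem_tiles := by
  intro dem_code dem_tile_digits _ hpre
  unfold Spec_parse_dem_tiles
  rcases hpre with h0 | ⟨hx, hd, hlog⟩
  · subst h0; rfl
  · -- replace the two Int arguments by casts of Nats
    obtain ⟨d, rfl⟩ : ∃ d : Nat, dem_tile_digits = (d : Int) :=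
      ⟨dem_tile_digits.toNat, (Int.toNat_of_nonneg (by omega)).symm⟩
    obtain ⟨X, rfl⟩ : ∃ X : Nat, dem_code = (X : Int) :=
      ⟨dem_code.toNat, (Int.toNat_of_nonneg (by omega)).symm⟩
    have hd1 : 1 ≤ d := by exact_mod_cast hd
    have hX0 : X ≠ 0 := by
      intro h; subst h; simp at hx
    have hXne : ((X : Int)) ≠ 0 := by exact_mod_cast hX0
    set B : Nat := 10 ^ d with hB
    have hB2 : 2 ≤ B := by
      calc 2 ≤ 10 ^ 1 := by norm_num
        _ ≤ B := Nat.pow_le_pow_right (by norm_num) hd1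
    set L : Nat := Nat.log 10 X with hLdef
    have hLd : L < 4 * d := by
      have : ((L : Nat) : Int) < 4 * (d : Int) := by
        simpa [Int.toNat_natCast] using hlog
      exact_mod_cast this
    set N : Nat := L / d + 1 with hN
    -- the two group counts agree
    have hndN : pvND B X = N := by
      rw [hB, pvND_eq d X hd1 hX0]
    have hN4 : N ≤ 4 := by
      have : L / d < 4 := (Nat.div_lt_iff_lt_mul (by omega)).mpr (by omega)
      omega
    have hXB : X < B ^ N := by
      calc X < 10 ^ (L + 1) := Nat.lt_pow_succ_log_self (by omega) X
        _ ≤ 10 ^ (d * N) := by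
            apply Nat.pow_le_pow_right (by omega)
            have h2 := Nat.div_add_mod L d
            have h3 : L % d < d := Nat.mod_lt _ (by omega)
            rw [hN]
            have h4 : d * (L / d + 1) = d * (L / d) + d := by rw [Nat.mul_add, Nat.mul_one]
            omega
        _ = B ^ N := by rw [hB, pow_mul]
    -- A side
    unfold parse_dem_tiles
    rw [if_neg hXne]
    have hfd : PySem.Int.floordiv ((Nat.log 10 ((X : Int)).toNat : Nat) : Int) (d : Int) + 1
        = ((N : Nat) : Int) := by
      rw [Int.toNat_natCast, ← hLdef, PySem.Int.floordiv_natCast L d, hN]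
      push_cast
      ring
    simp only [Int.toNat_natCast, ← hLdef] at hfd ⊢
    rw [hfd]
    have hN4' : ¬ (((N : Nat) : Int) > 4) := by exact_mod_cast not_lt.mpr (by exact_mod_cast hN4)
    rw [if_neg hN4']
    rw [pvAFold_spec d B hB N X [] hXB]
    -- B side
    unfold parse_dem_tiles_alt
    rw [if_neg hXne]
    have hfuel : X < ((X : Int)).toNat + 1 := by
      rw [Int.toNat_natCast]; omega
    rw [show ((d : Int)).toNat = d from Int.toNat_natCast d]
    rw [pvAltLoop_spec d B hB2 hB _ X [] hfuel]
    rw [hndN]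
    simp only [List.nil_append]
    have hlen : ¬ (((List.range N).map (fun k => ((X / B ^ k % B : Nat) : Int) - 1)).length > 4) := by
      simp [List.length_map, List.length_range]
      omega
    rw [if_neg hlen]
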